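-- pv_equiv track=rewrite | github.com/Intiser008/Data-ETL-Pipeline-Assistant-Using-Agentic-RAG | app/agent/service.py | _order_tables
-- ===== SOURCE A (Python) =====
-- def _order_tables(tables: list[str]) -> list[str]:
--     ordered: list[str] = []
--     seen = set()
--     for table in PREFERRED_LOAD_ORDER:
--         if table in tables:
--             ordered.append(table)
--             seen.add(table)
--     for table in tables:
--         if table not in seen:
--             ordered.append(table)
--     return ordered
--
-- PREFERRED_LOAD_ORDER = [
--     "patients",
--     "encounters",
--     "procedures",
--     "observations",
--     "medications",
--     "conditions",
-- ]
-- ===== SOURCE B (Python) =====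
-- PREFERRED_LOAD_ORDER = [
--     "patients",
--     "encounters",
--     "procedures",
--     "observations",
--     "medications",
--     "conditions",
-- ]
--
-- _RANK = {name: i for i, name in enumerate(PREFERRED_LOAD_ORDER)}
--
-- def _order_tables(tables: list[str]) -> list[str]:
--     # Bucket placement: one pass dropping each table into its rank bucket
--     # (a preferred bucket holds at most one copy), then flatten.
--     n = len(PREFERRED_LOAD_ORDER)
--     buckets = [[] for _ in range(n + 1)]
--     for t in tables:
--         r = _RANK.get(t, n)
--         if r == n or not buckets[r]:
--             buckets[r].append(t)
--     return [t for bucket in buckets for t in bucket]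
-- ===== Notes on version B (the rewrite author's own statement) =====
-- stated objective: alternative
-- what changed: B is a bucket sort: a precomputed name-to-rank dict, one pass dropping each table into its rank bucket (a preferred bucket keeps at most one copy, non-preferred all go to the overflow bucket in order), then the buckets are flattened -- instead of A's two loops scanning tables and a seen-set.
import Mathlib
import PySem

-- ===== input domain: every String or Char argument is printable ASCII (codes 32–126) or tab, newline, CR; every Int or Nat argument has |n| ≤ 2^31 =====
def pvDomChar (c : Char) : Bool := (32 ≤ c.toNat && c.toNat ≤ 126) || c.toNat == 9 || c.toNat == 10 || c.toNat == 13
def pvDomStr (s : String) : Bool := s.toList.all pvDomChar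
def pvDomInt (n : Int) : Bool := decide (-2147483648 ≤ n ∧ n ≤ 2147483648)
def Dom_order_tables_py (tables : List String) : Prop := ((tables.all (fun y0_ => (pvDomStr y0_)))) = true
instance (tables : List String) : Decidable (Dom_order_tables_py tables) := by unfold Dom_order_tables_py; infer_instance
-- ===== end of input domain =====

-- B replaces A's two membership-scanning loops by a bucket sort on a precomputed rank:
-- one pass drops each table into its rank bucket (a preferred bucket holds at most one copy),
-- then the buckets are flattened; same result, different algorithm (no speed claim).

def PREFERRED_LOAD_ORDER : List String :=
  ["patients", "encounters", "procedures", "observations", "medications", "conditions"]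

-- ===== PORT A =====
def order_tables_py (tables : List String) : List String :=
  -- for table in PREFERRED_LOAD_ORDER: if table in tables: ordered.append(table); seen.add(table)
  let st := PREFERRED_LOAD_ORDER.foldl
    (fun (st : List String × PySem.Set String) table =>
      if tables.contains table then (st.1 ++ [table], PySem.Set.add st.2 table) else st)
    ([], PySem.Set.empty)
  -- for table in tables: if table not in seen: ordered.append(table)
  tables.foldl
    (fun ordered table =>
      if PySem.Set.contains st.2 table then ordered else ordered ++ [table])
    st.1

-- ===== PORT B =====
-- _RANK = {name: i for i, name in enumerate(PREFERRED_LOAD_ORDER)}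
def pvRank : PySem.Dict String Int :=
  (PySem.List.enumerate PREFERRED_LOAD_ORDER).foldl
    (fun d p => PySem.Dict.insert d p.2 p.1) PySem.Dict.empty

def order_tables_py_alt (tables : List String) : List String :=
  -- buckets = [[] for _ in range(n + 1)]
  -- for t in tables: r = _RANK.get(t, n); if r == n or not buckets[r]: buckets[r].append(t)
  -- (r is always in [0, 6], so indexing with r.toNat / getD is exact here)
  let n : Int := 6
  let buckets := tables.foldl
    (fun (buckets : List (List String)) t =>
      let r := PySem.Dict.getD pvRank t n
      if r == n || (buckets.getD r.toNat []).isEmpty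
      then buckets.set r.toNat (buckets.getD r.toNat [] ++ [t])
      else buckets)
    (List.replicate 7 [])
  -- [t for bucket in buckets for t in bucket]
  buckets.flatten

-- ===== PRECONDITION & SPEC =====
def Spec_order_tables_py (tables : List String) (out : List String) : Prop := out = order_tables_py_alt tables
instance (tables : List String) (out : List String) : Decidable (Spec_order_tables_py tables out) := by unfold Spec_order_tables_py; infer_instance

-- ===== CLAIM (what is proved, stated in full; the proofs are below) =====
def Claim_equal_order_tables_py : Prop := ∀ (tables : List String), Dom_order_tables_py tables → Spec_order_tables_py tables (order_tables_py tables)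

-- ===== LEMMAS AND PROOFS =====

-- A's first loop: appends the preferred names present in `tables`, and `seen` collects exactly them.
theorem pvA_loop1 (tables : List String) (L : List String) (acc : List String) (s : PySem.Set String) :
    L.foldl
      (fun (st : List String × PySem.Set String) table =>
        if tables.contains table then (st.1 ++ [table], PySem.Set.add st.2 table) else st)
      (acc, s)
    = (acc ++ L.filter (fun t => tables.contains t),
       PySem.Set.update s (L.filter (fun t => tables.contains t))) := by
  induction L generalizing acc s with
  | nil => simp [PySem.Set.update]
  | cons t L ih =>
      rw [List.foldl_cons]
      by_cases h : t ∈ tables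
      · rw [if_pos (by simpa using h), ih]
        simp [h, PySem.Set.update_cons]
      · rw [if_neg (by simpa using h), ih]
        simp [h]

-- A's second loop: appends the elements not in `s`.
theorem pvA_loop2 (s : PySem.Set String) (L : List String) (acc : List String) :
    L.foldl (fun ordered table => if PySem.Set.contains s table then ordered else ordered ++ [table]) acc
    = acc ++ L.filter (fun t => !PySem.Set.contains s t) := by
  induction L generalizing acc with
  | nil => simp
  | cons t L ih =>
      rw [List.foldl_cons]
      by_cases h : t ∈ s
      · rw [if_pos (by simpa using h), ih]
        simp [h]
      · rw [if_neg (by simpa using h), ih]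
        simp [h]

-- one preferred bucket: [p] once p has been seen, [] before
def pvE (p : String) (P : List String) : List String :=
  if P.contains p then [p] else []

-- B's invariant: the bucket state after processing the prefix P
def pvInv (P : List String) : List (List String) :=
  [pvE "patients" P, pvE "encounters" P, pvE "procedures" P,
   pvE "observations" P, pvE "medications" P, pvE "conditions" P,
   P.filter (fun t => !(PREFERRED_LOAD_ORDER.contains t))]

-- the literal rank lookups, computed once
theorem pvRank_pat : PySem.Dict.getD pvRank "patients" 6 = 0 := by decide
theorem pvRank_enc : PySem.Dict.getD pvRank "encounters" 6 = 1 := by decide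
theorem pvRank_pro : PySem.Dict.getD pvRank "procedures" 6 = 2 := by decide
theorem pvRank_obs : PySem.Dict.getD pvRank "observations" 6 = 3 := by decide
theorem pvRank_med : PySem.Dict.getD pvRank "medications" 6 = 4 := by decide
theorem pvRank_con : PySem.Dict.getD pvRank "conditions" 6 = 5 := by decide
theorem pvRank_other (t : String) (h1 : t ≠ "patients") (h2 : t ≠ "encounters")
    (h3 : t ≠ "procedures") (h4 : t ≠ "observations") (h5 : t ≠ "medications")
    (h6 : t ≠ "conditions") : PySem.Dict.getD pvRank t 6 = 6 := by
  simp [pvRank, PREFERRED_LOAD_ORDER, PySem.List.enumerate,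
        PySem.Dict.getD_insert, PySem.Dict.getD_empty, h1, h2, h3, h4, h5, h6]

-- B's step preserves the invariant.
theorem pvB_step (P : List String) (t : String) :
    (let r := PySem.Dict.getD pvRank t 6;
     if r == (6 : Int) || ((pvInv P).getD r.toNat []).isEmpty
     then (pvInv P).set r.toNat ((pvInv P).getD r.toNat [] ++ [t])
     else pvInv P)
    = pvInv (P ++ [t]) := by
  by_cases h1 : t = "patients"
  · subst h1; by_cases h : "patients" ∈ P <;> simp [pvRank_pat, pvInv, pvE, PREFERRED_LOAD_ORDER, h]
  by_cases h2 : t = "encounters"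
  · subst h2; by_cases h : "encounters" ∈ P <;> simp [pvRank_enc, pvInv, pvE, PREFERRED_LOAD_ORDER, h]
  by_cases h3 : t = "procedures"
  · subst h3; by_cases h : "procedures" ∈ P <;> simp [pvRank_pro, pvInv, pvE, PREFERRED_LOAD_ORDER, h]
  by_cases h4 : t = "observations"
  · subst h4; by_cases h : "observations" ∈ P <;> simp [pvRank_obs, pvInv, pvE, PREFERRED_LOAD_ORDER, h]
  by_cases h5 : t = "medications"
  · subst h5; by_cases h : "medications" ∈ P <;> simp [pvRank_med, pvInv, pvE, PREFERRED_LOAD_ORDER, h]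
  by_cases h6 : t = "conditions"
  · subst h6; by_cases h : "conditions" ∈ P <;> simp [pvRank_con, pvInv, pvE, PREFERRED_LOAD_ORDER, h]
  -- t is not preferred: it goes to the last bucket
  simp [pvRank_other t h1 h2 h3 h4 h5 h6, pvInv, pvE, PREFERRED_LOAD_ORDER,
        h1, h2, h3, h4, h5, h6, Ne.symm h1, Ne.symm h2, Ne.symm h3,
        Ne.symm h4, Ne.symm h5, Ne.symm h6]

-- B's loop, fully characterised by the invariant.
theorem pvB_loop (L P : List String) :
    L.foldl
      (fun (buckets : List (List String)) t =>
        let r := PySem.Dict.getD pvRank t 6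
        if r == (6 : Int) || (buckets.getD r.toNat []).isEmpty
        then buckets.set r.toNat (buckets.getD r.toNat [] ++ [t])
        else buckets)
      (pvInv P)
    = pvInv (P ++ L) := by
  induction L generalizing P with
  | nil => simp
  | cons t L ih =>
      rw [List.foldl_cons]
      have := pvB_step P t
      simp only at this
      rw [this, ih]
      simp

-- the preferred segment of A's result, as the concatenation of B's preferred buckets
-- filter over a cons, as an appended singleton segment
theorem pvfilter_split (p : String → Bool) (x : String) (l : List String) :
    List.filter p (x :: l) = (if p x then [x] else []) ++ List.filter p l := by
  by_cases h : p x <;> simp [h]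

-- the preferred segment of A's result, as the concatenation of B's preferred buckets
theorem pvPref_filter (tables : List String) :
    PREFERRED_LOAD_ORDER.filter (fun t => tables.contains t)
    = pvE "patients" tables ++ (pvE "encounters" tables ++ (pvE "procedures" tables ++
      (pvE "observations" tables ++ (pvE "medications" tables ++ pvE "conditions" tables)))) := by
  simp only [PREFERRED_LOAD_ORDER, pvfilter_split, List.filter_nil, List.append_nil, pvE]

-- ===== VERDICT (by name: the statement is the Claim_ definition above) =====
theorem order_tables_py_spec : Claim_equal_order_tables_py := by
  intro tables _
  show order_tables_py tables = order_tables_py_alt tables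
  rw [order_tables_py, order_tables_py_alt]
  have hstart : (List.replicate 7 ([] : List String)) = pvInv [] := by
    simp [pvInv, pvE]
  simp only [pvA_loop1, pvA_loop2, hstart, pvB_loop, List.nil_append]
  -- both sides are now closed forms over filters of `tables`
  have hrest :
      tables.filter (fun t =>
        !PySem.Set.contains
          (PySem.Set.update PySem.Set.empty
            (PREFERRED_LOAD_ORDER.filter (fun t => tables.contains t))) t)
      = tables.filter (fun t => !(PREFERRED_LOAD_ORDER.contains t)) := by
    apply List.filter_congr
    intro t ht
    by_cases h : t ∈ PREFERRED_LOAD_ORDER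
    · simp [PySem.Set.mem_update, List.mem_filter, h, ht]
    · simp [PySem.Set.mem_update, List.mem_filter, h]
  rw [hrest, pvPref_filter]
  simp [pvInv]
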